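-- pv_equiv track=rewrite | github.com/JoshPomeroy04/HS-Sophomore-Year-Projects | ITP100/exercises/voting/votingrmstrd/voting.py | exhaustive
-- ===== SOURCE A (Python) =====
-- def exhaustive(election):
--     """
--     Loser gets knocked out then it's only the two winners.
--
--       >>> exhaustive([(1, 2, 3), (1, 2, 3), (2, 1, 3), (1, 3, 2), (2, 3, 1), (3, 1, 2)])
--       1
--       >>> exhaustive([(1, 2, 3), (1, 2, 3), (2, 3, 1), (2, 1, 3), (3, 2, 1)])
--       2
--     """
--     vote_totals = {1: 0, 2: 0, 3: 0}
--     for vote in election: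
--         vote_totals[vote[0]] += 1
--     loser = min(vote_totals.items(), key = lambda x: x[1])[0]
--     vote_totals2 = {1: 0, 2: 0, 3: 0}
--     for vote in election:
--         if vote[0] == loser:
--             vote_totals2[vote[1]] += 1
--         else:
--             vote_totals2[vote[0]] += 1
--     return max(vote_totals2.items(), key = lambda x: x[1])[0]
-- ===== SOURCE B (Python) =====
-- def exhaustive(election):
--     # One pass builds a 3x4 (first-choice x clamped-second-choice) contingency matrix;
--     # the first-round counts, the loser and the final tallies are then derived
--     # arithmetically from the matrix, with no second pass over the ballots.
--     table = [[0, 0, 0, 0], [0, 0, 0, 0], [0, 0, 0, 0]]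
--     for v in election:
--         second = v[1] if len(v) > 1 and 1 <= v[1] <= 3 else 0
--         table[v[0] - 1][second] += 1
--     firsts = [sum(row) for row in table]
--     loser = 1 + firsts.index(min(firsts))
--     finals = [(0 if c == loser else firsts[c - 1]) + table[loser - 1][c]
--               for c in (1, 2, 3)]
--     return 1 + finals.index(max(finals))
-- ===== Notes on version B (the rewrite author's own statement) =====
-- stated objective: alternative
-- what changed: B makes a single pass over the ballots building a 3x4 (first choice x clamped second choice) contingency matrix, then derives the first-round counts (row sums), the loser and the final tallies purely arithmetically from that matrix — no second pass over the ballots — selecting loser and winner via list index-of-min/index-of-max instead of A's dict item scans.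
import Mathlib
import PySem

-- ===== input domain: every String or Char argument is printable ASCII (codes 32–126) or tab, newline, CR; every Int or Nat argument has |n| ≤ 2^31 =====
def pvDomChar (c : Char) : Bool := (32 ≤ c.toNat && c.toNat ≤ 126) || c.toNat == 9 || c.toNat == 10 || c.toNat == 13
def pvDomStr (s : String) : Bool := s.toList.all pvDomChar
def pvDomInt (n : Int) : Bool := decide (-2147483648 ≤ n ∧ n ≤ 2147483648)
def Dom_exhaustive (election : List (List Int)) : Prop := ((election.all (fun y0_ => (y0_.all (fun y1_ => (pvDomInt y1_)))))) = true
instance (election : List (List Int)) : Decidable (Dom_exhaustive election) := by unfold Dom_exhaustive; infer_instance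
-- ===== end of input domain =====

-- B builds a 3x4 (first choice x clamped second choice) contingency matrix in one pass over the
-- ballots and derives the first-round counts, the loser and the final tallies arithmetically from
-- that matrix (no second pass over the ballots); objective: alternative decomposition, same O(n) cost.

-- ===== PORT A =====
def exhaustive (election : List (List Int)) : Int :=
  let vt := election.foldl
    (fun d v => d.insert (PySem.List.pyGetD v 0 0) (d.getD (PySem.List.pyGetD v 0 0) 0 + 1))
    (PySem.Dict.ofList ([(1, 0), (2, 0), (3, 0)] : List (Int × Int)))
  let loser := ((PySem.List.min? vt.items (fun x => x.2)).getD (0, 0)).1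
  let vt2 := election.foldl
    (fun d v =>
      if PySem.List.pyGetD v 0 0 == loser then
        d.insert (PySem.List.pyGetD v 1 0) (d.getD (PySem.List.pyGetD v 1 0) 0 + 1)
      else
        d.insert (PySem.List.pyGetD v 0 0) (d.getD (PySem.List.pyGetD v 0 0) 0 + 1))
    (PySem.Dict.ofList ([(1, 0), (2, 0), (3, 0)] : List (Int × Int)))
  ((PySem.List.max? vt2.items (fun x => x.2)).getD (0, 0)).1

-- ===== PORT B =====
-- B's clamped second choice: v[1] if len(v) > 1 and 1 <= v[1] <= 3 else 0
def pvSecond (v : List Int) : Int :=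
  if 1 < v.length ∧ 1 ≤ PySem.List.pyGetD v 1 0 ∧ PySem.List.pyGetD v 1 0 ≤ 3 then
    PySem.List.pyGetD v 1 0
  else 0

-- B's per-ballot update: table[v[0] - 1][second] += 1 (pyGetD/pySetD carry Python's
-- negative-index wraparound; the inputs where Python raises IndexError here are outside Pre_)
def pvBump (table : List (List Int)) (v : List Int) : List (List Int) :=
  let second := pvSecond v
  let row := PySem.List.pyGetD table (PySem.List.pyGetD v 0 0 - 1) []
  PySem.List.pySetD table (PySem.List.pyGetD v 0 0 - 1)
    (PySem.List.pySetD row second (PySem.List.pyGetD row second 0 + 1))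

def exhaustive_alt (election : List (List Int)) : Int :=
  let table := election.foldl pvBump
    [[0, 0, 0, 0], [0, 0, 0, 0], [0, 0, 0, 0]]
  let firsts := table.map (fun row => row.sum)
  let loser : Int :=
    1 + (((PySem.List.index? firsts ((PySem.List.min? firsts (fun t => t)).getD 0)).getD 0 : Nat) : Int)
  let finals := ([1, 2, 3] : List Int).map (fun c =>
    (if c == loser then 0 else PySem.List.pyGetD firsts (c - 1) 0) +
      PySem.List.pyGetD (PySem.List.pyGetD table (loser - 1) []) c 0)
  1 + (((PySem.List.index? finals ((PySem.List.max? finals (fun t => t)).getD 0)).getD 0 : Nat) : Int)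

-- ===== PRECONDITION & SPEC =====
-- helper for Pre_: the first-round loser (min first-choice count, ties to the smaller candidate)
def pvLoser (election : List (List Int)) : Int :=
  let n1 : Int := (election.countP (fun v => PySem.List.pyGetD v 0 0 == 1) : Int)
  let n2 : Int := (election.countP (fun v => PySem.List.pyGetD v 0 0 == 2) : Int)
  let n3 : Int := (election.countP (fun v => PySem.List.pyGetD v 0 0 == 3) : Int)
  if n1 ≤ n2 ∧ n1 ≤ n3 then 1 else if n2 ≤ n3 then 2 else 3

-- Pre_ is exactly where A returns: every ballot's first choice is a candidate 1/2/3 (else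
-- IndexError/KeyError in A's first pass), and ballots whose first choice is the first-round
-- loser have a second choice that is a candidate 1/2/3 (else IndexError/KeyError in A's
-- second pass).
def Pre_exhaustive (election : List (List Int)) : Prop :=
  ∀ v ∈ election,
    (PySem.List.pyGet? v 0 = some 1 ∨ PySem.List.pyGet? v 0 = some 2 ∨ PySem.List.pyGet? v 0 = some 3) ∧
    (PySem.List.pyGet? v 0 = some (pvLoser election) →
      (PySem.List.pyGet? v 1 = some 1 ∨ PySem.List.pyGet? v 1 = some 2 ∨ PySem.List.pyGet? v 1 = some 3))
instance (election : List (List Int)) : Decidable (Pre_exhaustive election) := by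
  unfold Pre_exhaustive; infer_instance

def pvWitness_exhaustive : List (List Int) := [[1, 2], [2, 1], [3, 1]]

def Spec_exhaustive (election : List (List Int)) (out : Int) : Prop := out = exhaustive_alt election
instance (election : List (List Int)) (out : Int) : Decidable (Spec_exhaustive election out) := by
  unfold Spec_exhaustive; infer_instance

-- ===== CLAIM (what is proved, stated in full; the proofs are below) =====
def Claim_equal_exhaustive : Prop :=
  ∀ (election : List (List Int)), Dom_exhaustive election → Pre_exhaustive election →
    Spec_exhaustive election (exhaustive election)

-- ===== LEMMAS AND PROOFS =====

-- the (first choice, clamped second choice) cell a ballot falls in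
def pvKey (v : List Int) : Int × Int := (PySem.List.pyGetD v 0 0, pvSecond v)

-- the common normal form both ports are reduced to
def pvCanon (e : List (List Int)) : Int :=
  let n1 : Int := (e.countP (fun v => PySem.List.pyGetD v 0 0 == 1) : Int)
  let n2 : Int := (e.countP (fun v => PySem.List.pyGetD v 0 0 == 2) : Int)
  let n3 : Int := (e.countP (fun v => PySem.List.pyGetD v 0 0 == 3) : Int)
  let L : Int := pvLoser e
  let t : Int → Int → Int := fun c nc =>
    (if L == c then 0 else nc) +
      (e.countP (fun v => (PySem.List.pyGetD v 0 0 == L) && (PySem.List.pyGetD v 1 0 == c)) : Int)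
  if t 1 n1 ≥ t 2 n2 ∧ t 1 n1 ≥ t 3 n3 then 1 else if t 2 n2 ≥ t 3 n3 then 2 else 3

lemma min3_items (x y z : Int) :
    PySem.List.min? [((1 : Int), x), (2, y), (3, z)] (fun p => p.2) =
      some (if x ≤ y ∧ x ≤ z then ((1 : Int), x) else if y ≤ z then (2, y) else (3, z)) := by
  simp only [PySem.List.min?, List.foldl]
  split_ifs <;> simp_all <;> omega

lemma max3_items (x y z : Int) :
    PySem.List.max? [((1 : Int), x), (2, y), (3, z)] (fun p => p.2) =
      some (if x ≥ y ∧ x ≥ z then ((1 : Int), x) else if y ≥ z then (2, y) else (3, z)) := by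
  simp only [PySem.List.max?, List.foldl]
  split_ifs <;> simp_all <;> omega

-- A's tally loop over a {1,2,3}-keyed dict, for an arbitrary key function
lemma fold_tally (k : List Int → Int) (l : List (List Int)) (a b c : Int)
    (h : ∀ v ∈ l, k v = 1 ∨ k v = 2 ∨ k v = 3) :
    l.foldl (fun d v => d.insert (k v) (d.getD (k v) 0 + 1)) (PySem.Dict.mk [(1, a), (2, b), (3, c)]) =
      PySem.Dict.mk [(1, a + (l.countP (fun v => k v == 1) : Int)),
                     (2, b + (l.countP (fun v => k v == 2) : Int)),
                     (3, c + (l.countP (fun v => k v == 3) : Int))] := by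
  induction l generalizing a b c with
  | nil => simp
  | cons v t ih =>
    have hv := h v (List.mem_cons_self)
    have ht : ∀ w ∈ t, k w = 1 ∨ k w = 2 ∨ k w = 3 := fun w hw => h w (List.mem_cons_of_mem _ hw)
    simp only [List.foldl_cons, List.countP_cons]
    rcases hv with hv | hv | hv <;> rw [hv] <;>
      [ (have step : (PySem.Dict.mk [((1:Int), a), (2, b), (3, c)]).insert 1
            ((PySem.Dict.mk [((1:Int), a), (2, b), (3, c)]).getD 1 0 + 1) =
            PySem.Dict.mk [(1, a + 1), (2, b), (3, c)] := rfl);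
        (have step : (PySem.Dict.mk [((1:Int), a), (2, b), (3, c)]).insert 2
            ((PySem.Dict.mk [((1:Int), a), (2, b), (3, c)]).getD 2 0 + 1) =
            PySem.Dict.mk [(1, a), (2, b + 1), (3, c)] := rfl);
        (have step : (PySem.Dict.mk [((1:Int), a), (2, b), (3, c)]).insert 3
            ((PySem.Dict.mk [((1:Int), a), (2, b), (3, c)]).getD 3 0 + 1) =
            PySem.Dict.mk [(1, a), (2, b), (3, c + 1)] := rfl) ] <;>
      rw [step, ih _ _ _ ht] <;> simp <;> omega

-- the combined second-pass key: what A's branching tally counts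
lemma countP_combined (l : List (List Int)) (loser c : Int) :
    (l.countP (fun v =>
        (if PySem.List.pyGetD v 0 0 == loser then PySem.List.pyGetD v 1 0
         else PySem.List.pyGetD v 0 0) == c) : Int) =
      (if loser == c then 0 else (l.countP (fun v => PySem.List.pyGetD v 0 0 == c) : Int)) +
      (l.countP (fun v =>
        (PySem.List.pyGetD v 0 0 == loser) && (PySem.List.pyGetD v 1 0 == c)) : Int) := by
  induction l with
  | nil => simp
  | cons v t ih =>
    simp only [List.countP_cons] at *
    by_cases h1 : PySem.List.pyGetD v 0 0 = loser <;>
      by_cases h2 : loser = c <;>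
      by_cases h3 : PySem.List.pyGetD v 1 0 = c <;>
      by_cases h4 : PySem.List.pyGetD v 0 0 = c <;>
      simp_all <;> omega

-- each clamped second choice lands in exactly one of the four buckets 0..3
lemma count4 (e : List (List Int)) (c : Int) :
    e.countP (fun v => pvKey v == (c, 0)) + e.countP (fun v => pvKey v == (c, 1)) +
      e.countP (fun v => pvKey v == (c, 2)) + e.countP (fun v => pvKey v == (c, 3)) =
      e.countP (fun v => PySem.List.pyGetD v 0 0 == c) := by
  induction e with
  | nil => rfl
  | cons v t ih =>
    simp only [List.countP_cons]
    have hs : pvSecond v = 0 ∨ pvSecond v = 1 ∨ pvSecond v = 2 ∨ pvSecond v = 3 := by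
      unfold pvSecond; split_ifs with h
      · omega
      · left; rfl
    by_cases hc : PySem.List.pyGetD v 0 0 = c <;>
      rcases hs with h | h | h | h <;>
      simp_all [pvKey, Prod.ext_iff] <;> omega

-- 1 + [x,y,z].index(min([x,y,z])) as an if-chain (ties go to the smaller index)
lemma idx_min3 (x y z : Int) :
    (1 : Int) +
      (((PySem.List.index? [x, y, z] ((PySem.List.min? [x, y, z] (fun t => t)).getD 0)).getD 0 : Nat) : Int) =
      if x ≤ y ∧ x ≤ z then 1 else if y ≤ z then 2 else 3 := by
  have hmin : PySem.List.min? [x, y, z] (fun t => t) = some (min (min x y) z) := by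
    rw [PySem.List.min?_id_cons]; simp [List.foldl]
  rw [hmin, Option.getD_some]
  split_ifs with h1 h2
  · have hm : min (min x y) z = x := by omega
    rw [hm, PySem.List.index?_cons_self]
    simp
  · have hm : min (min x y) z = y := by omega
    have hx : x ≠ y := by omega
    rw [hm, PySem.List.index?_cons_of_ne _ hx, PySem.List.index?_cons_self]
    simp
  · have hm : min (min x y) z = z := by omega
    have hx : x ≠ z := by omega
    have hy : y ≠ z := by omega
    rw [hm, PySem.List.index?_cons_of_ne _ hx, PySem.List.index?_cons_of_ne _ hy,
      PySem.List.index?_cons_self]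
    simp

-- 1 + [x,y,z].index(max([x,y,z])) as an if-chain (ties go to the smaller index)
lemma idx_max3 (x y z : Int) :
    (1 : Int) +
      (((PySem.List.index? [x, y, z] ((PySem.List.max? [x, y, z] (fun t => t)).getD 0)).getD 0 : Nat) : Int) =
      if x ≥ y ∧ x ≥ z then 1 else if y ≥ z then 2 else 3 := by
  have hmax : PySem.List.max? [x, y, z] (fun t => t) = some (max (max x y) z) := by
    rw [PySem.List.max?_id_cons]; simp [List.foldl]
  rw [hmax, Option.getD_some]
  split_ifs with h1 h2
  · have hm : max (max x y) z = x := by omega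
    rw [hm, PySem.List.index?_cons_self]
    simp
  · have hm : max (max x y) z = y := by omega
    have hx : x ≠ y := by omega
    rw [hm, PySem.List.index?_cons_of_ne _ hx, PySem.List.index?_cons_self]
    simp
  · have hm : max (max x y) z = z := by omega
    have hx : x ≠ z := by omega
    have hy : y ≠ z := by omega
    rw [hm, PySem.List.index?_cons_of_ne _ hx, PySem.List.index?_cons_of_ne _ hy,
      PySem.List.index?_cons_self]
    simp

-- for a real candidate c, the pair test against (L, c) is the conjunction of the two raw tests
lemma key_pair (L c : Int) (hc : c = 1 ∨ c = 2 ∨ c = 3) (v : List Int) :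
    (pvKey v == (L, c)) =
      ((PySem.List.pyGetD v 0 0 == L) && (PySem.List.pyGetD v 1 0 == c)) := by
  have hg0 : v.length ≤ 1 → PySem.List.pyGetD v 1 0 = 0 := by
    intro h
    cases v with
    | nil => rfl
    | cons a t =>
      cases t with
      | nil => rfl
      | cons b t2 => simp [List.length] at h
  have hpair : (pvKey v == (L, c)) =
      ((PySem.List.pyGetD v 0 0 == L) && (pvSecond v == c)) := rfl
  rw [hpair]
  unfold pvSecond
  split_ifs with h
  · rfl
  · have hgc : PySem.List.pyGetD v 1 0 ≠ c := by
      intro hEq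
      by_cases hlen : 1 < v.length
      · exact h ⟨hlen, by omega, by omega⟩
      · have := hg0 (by omega)
        omega
    have h0c : ((0 : Int) == c) = (PySem.List.pyGetD v 1 0 == c) := by
      simp [hgc]
      omega
    rw [h0c]

-- on Pre_, every ballot's first choice is a real candidate
lemma head_of_pre (e : List (List Int)) (hpre : Pre_exhaustive e) :
    ∀ v ∈ e, PySem.List.pyGetD v 0 0 = 1 ∨ PySem.List.pyGetD v 0 0 = 2 ∨
      PySem.List.pyGetD v 0 0 = 3 := by
  intro v hv
  rcases (hpre v hv).1 with h | h | h <;> simp [PySem.List.pyGetD, h]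

-- B's tallying pass: the matrix fold, entry by entry, when every first choice is 1/2/3
lemma bump_fold (l : List (List Int))
    (h : ∀ v ∈ l, PySem.List.pyGetD v 0 0 = 1 ∨ PySem.List.pyGetD v 0 0 = 2 ∨
      PySem.List.pyGetD v 0 0 = 3)
    (a0 a1 a2 a3 b0 b1 b2 b3 c0 c1 c2 c3 : Int) :
    l.foldl pvBump [[a0, a1, a2, a3], [b0, b1, b2, b3], [c0, c1, c2, c3]] =
      [[a0 + (l.countP (fun v => pvKey v == (1, 0)) : Int),
        a1 + (l.countP (fun v => pvKey v == (1, 1)) : Int),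
        a2 + (l.countP (fun v => pvKey v == (1, 2)) : Int),
        a3 + (l.countP (fun v => pvKey v == (1, 3)) : Int)],
       [b0 + (l.countP (fun v => pvKey v == (2, 0)) : Int),
        b1 + (l.countP (fun v => pvKey v == (2, 1)) : Int),
        b2 + (l.countP (fun v => pvKey v == (2, 2)) : Int),
        b3 + (l.countP (fun v => pvKey v == (2, 3)) : Int)],
       [c0 + (l.countP (fun v => pvKey v == (3, 0)) : Int),
        c1 + (l.countP (fun v => pvKey v == (3, 1)) : Int),
        c2 + (l.countP (fun v => pvKey v == (3, 2)) : Int),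
        c3 + (l.countP (fun v => pvKey v == (3, 3)) : Int)]] := by
  induction l generalizing a0 a1 a2 a3 b0 b1 b2 b3 c0 c1 c2 c3 with
  | nil => simp
  | cons v t ih =>
    have hv := h v (List.mem_cons_self)
    have ht : ∀ w ∈ t, PySem.List.pyGetD w 0 0 = 1 ∨ PySem.List.pyGetD w 0 0 = 2 ∨
        PySem.List.pyGetD w 0 0 = 3 := fun w hw => h w (List.mem_cons_of_mem _ hw)
    have hs : pvSecond v = 0 ∨ pvSecond v = 1 ∨ pvSecond v = 2 ∨ pvSecond v = 3 := by
      unfold pvSecond; split_ifs with hcond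
      · omega
      · left; rfl
    simp only [List.foldl_cons, List.countP_cons]
    rcases hv with hv | hv | hv
    · rcases hs with hs | hs | hs | hs
      · rw [show pvBump [[a0, a1, a2, a3], [b0, b1, b2, b3], [c0, c1, c2, c3]] v =
            [[a0 + 1, a1, a2, a3], [b0, b1, b2, b3], [c0, c1, c2, c3]] from by
              unfold pvBump; rw [hv, hs]; rfl]
        rw [ih ht]
        simp [pvKey, hv, hs, Prod.ext_iff]
        omega
      · rw [show pvBump [[a0, a1, a2, a3], [b0, b1, b2, b3], [c0, c1, c2, c3]] v =
            [[a0, a1 + 1, a2, a3], [b0, b1, b2, b3], [c0, c1, c2, c3]] from by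
              unfold pvBump; rw [hv, hs]; rfl]
        rw [ih ht]
        simp [pvKey, hv, hs, Prod.ext_iff]
        omega
      · rw [show pvBump [[a0, a1, a2, a3], [b0, b1, b2, b3], [c0, c1, c2, c3]] v =
            [[a0, a1, a2 + 1, a3], [b0, b1, b2, b3], [c0, c1, c2, c3]] from by
              unfold pvBump; rw [hv, hs]; rfl]
        rw [ih ht]
        simp [pvKey, hv, hs, Prod.ext_iff]
        omega
      · rw [show pvBump [[a0, a1, a2, a3], [b0, b1, b2, b3], [c0, c1, c2, c3]] v =
            [[a0, a1, a2, a3 + 1], [b0, b1, b2, b3], [c0, c1, c2, c3]] from by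
              unfold pvBump; rw [hv, hs]; rfl]
        rw [ih ht]
        simp [pvKey, hv, hs, Prod.ext_iff]
        omega
    · rcases hs with hs | hs | hs | hs
      · rw [show pvBump [[a0, a1, a2, a3], [b0, b1, b2, b3], [c0, c1, c2, c3]] v =
            [[a0, a1, a2, a3], [b0 + 1, b1, b2, b3], [c0, c1, c2, c3]] from by
              unfold pvBump; rw [hv, hs]; rfl]
        rw [ih ht]
        simp [pvKey, hv, hs, Prod.ext_iff]
        omega
      · rw [show pvBump [[a0, a1, a2, a3], [b0, b1, b2, b3], [c0, c1, c2, c3]] v =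
            [[a0, a1, a2, a3], [b0, b1 + 1, b2, b3], [c0, c1, c2, c3]] from by
              unfold pvBump; rw [hv, hs]; rfl]
        rw [ih ht]
        simp [pvKey, hv, hs, Prod.ext_iff]
        omega
      · rw [show pvBump [[a0, a1, a2, a3], [b0, b1, b2, b3], [c0, c1, c2, c3]] v =
            [[a0, a1, a2, a3], [b0, b1, b2 + 1, b3], [c0, c1, c2, c3]] from by
              unfold pvBump; rw [hv, hs]; rfl]
        rw [ih ht]
        simp [pvKey, hv, hs, Prod.ext_iff]
        omega
      · rw [show pvBump [[a0, a1, a2, a3], [b0, b1, b2, b3], [c0, c1, c2, c3]] v =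
            [[a0, a1, a2, a3], [b0, b1, b2, b3 + 1], [c0, c1, c2, c3]] from by
              unfold pvBump; rw [hv, hs]; rfl]
        rw [ih ht]
        simp [pvKey, hv, hs, Prod.ext_iff]
        omega
    · rcases hs with hs | hs | hs | hs
      · rw [show pvBump [[a0, a1, a2, a3], [b0, b1, b2, b3], [c0, c1, c2, c3]] v =
            [[a0, a1, a2, a3], [b0, b1, b2, b3], [c0 + 1, c1, c2, c3]] from by
              unfold pvBump; rw [hv, hs]; rfl]
        rw [ih ht]
        simp [pvKey, hv, hs, Prod.ext_iff]
        omega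
      · rw [show pvBump [[a0, a1, a2, a3], [b0, b1, b2, b3], [c0, c1, c2, c3]] v =
            [[a0, a1, a2, a3], [b0, b1, b2, b3], [c0, c1 + 1, c2, c3]] from by
              unfold pvBump; rw [hv, hs]; rfl]
        rw [ih ht]
        simp [pvKey, hv, hs, Prod.ext_iff]
        omega
      · rw [show pvBump [[a0, a1, a2, a3], [b0, b1, b2, b3], [c0, c1, c2, c3]] v =
            [[a0, a1, a2, a3], [b0, b1, b2, b3], [c0, c1, c2 + 1, c3]] from by
              unfold pvBump; rw [hv, hs]; rfl]
        rw [ih ht]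
        simp [pvKey, hv, hs, Prod.ext_iff]
        omega
      · rw [show pvBump [[a0, a1, a2, a3], [b0, b1, b2, b3], [c0, c1, c2, c3]] v =
            [[a0, a1, a2, a3], [b0, b1, b2, b3], [c0, c1, c2, c3 + 1]] from by
              unfold pvBump; rw [hv, hs]; rfl]
        rw [ih ht]
        simp [pvKey, hv, hs, Prod.ext_iff]
        omega

-- B's port evaluates to the normal form when every first choice is 1/2/3
lemma B_canon (e : List (List Int))
    (hhead : ∀ v ∈ e, PySem.List.pyGetD v 0 0 = 1 ∨ PySem.List.pyGetD v 0 0 = 2 ∨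
      PySem.List.pyGetD v 0 0 = 3) :
    exhaustive_alt e = pvCanon e := by
  unfold exhaustive_alt
  rw [bump_fold e hhead]
  simp only [List.map_cons, List.map_nil, List.sum_cons, List.sum_nil, zero_add, add_zero]
  have s1 : ((e.countP (fun v => pvKey v == (1, 0)) : Int) +
      ((e.countP (fun v => pvKey v == (1, 1)) : Int) +
        ((e.countP (fun v => pvKey v == (1, 2)) : Int) +
          (e.countP (fun v => pvKey v == (1, 3)) : Int)))) =
      (e.countP (fun v => PySem.List.pyGetD v 0 0 == 1) : Int) := by
    have h := count4 e 1; omega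
  have s2 : ((e.countP (fun v => pvKey v == (2, 0)) : Int) +
      ((e.countP (fun v => pvKey v == (2, 1)) : Int) +
        ((e.countP (fun v => pvKey v == (2, 2)) : Int) +
          (e.countP (fun v => pvKey v == (2, 3)) : Int)))) =
      (e.countP (fun v => PySem.List.pyGetD v 0 0 == 2) : Int) := by
    have h := count4 e 2; omega
  have s3 : ((e.countP (fun v => pvKey v == (3, 0)) : Int) +
      ((e.countP (fun v => pvKey v == (3, 1)) : Int) +
        ((e.countP (fun v => pvKey v == (3, 2)) : Int) +
          (e.countP (fun v => pvKey v == (3, 3)) : Int)))) =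
      (e.countP (fun v => PySem.List.pyGetD v 0 0 == 3) : Int) := by
    have h := count4 e 3; omega
  rw [s1, s2, s3, idx_min3]
  set n1 := (e.countP (fun v => PySem.List.pyGetD v 0 0 == 1) : Int) with hn1
  set n2 := (e.countP (fun v => PySem.List.pyGetD v 0 0 == 2) : Int) with hn2
  set n3 := (e.countP (fun v => PySem.List.pyGetD v 0 0 == 3) : Int) with hn3
  set L := (if n1 ≤ n2 ∧ n1 ≤ n3 then (1 : Int) else if n2 ≤ n3 then 2 else 3) with hLdef
  have hL : L = 1 ∨ L = 2 ∨ L = 3 := by rw [hLdef]; split_ifs <;> simp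
  have k1 := funext (fun v => key_pair L 1 (Or.inl rfl) v)
  have k2 := funext (fun v => key_pair L 2 (Or.inr (Or.inl rfl)) v)
  have k3 := funext (fun v => key_pair L 3 (Or.inr (Or.inr rfl)) v)
  unfold pvCanon pvLoser
  rw [← hn1, ← hn2, ← hn3, ← hLdef]
  rcases hL with h | h | h <;> rw [h] <;> rw [h] at k1 k2 k3 <;>
    simp only [show ((1:Int) - 1) = 0 from rfl, show ((2:Int) - 1) = 1 from rfl,
      show ((3:Int) - 1) = 2 from rfl] <;>
    simp only [show ∀ r1 r2 r3 : List Int, PySem.List.pyGetD [r1, r2, r3] 0 [] = r1 from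
        fun _ _ _ => rfl,
      show ∀ r1 r2 r3 : List Int, PySem.List.pyGetD [r1, r2, r3] 1 [] = r2 from
        fun _ _ _ => rfl,
      show ∀ r1 r2 r3 : List Int, PySem.List.pyGetD [r1, r2, r3] 2 [] = r3 from
        fun _ _ _ => rfl] <;>
    simp only [show ∀ a b c : Int, PySem.List.pyGetD [a, b, c] 0 0 = a from fun _ _ _ => rfl,
      show ∀ a b c : Int, PySem.List.pyGetD [a, b, c] 1 0 = b from fun _ _ _ => rfl,
      show ∀ a b c : Int, PySem.List.pyGetD [a, b, c] 2 0 = c from fun _ _ _ => rfl,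
      show ∀ x0 x1 x2 x3 : Int, PySem.List.pyGetD [x0, x1, x2, x3] 1 0 = x1 from
        fun _ _ _ _ => rfl,
      show ∀ x0 x1 x2 x3 : Int, PySem.List.pyGetD [x0, x1, x2, x3] 2 0 = x2 from
        fun _ _ _ _ => rfl,
      show ∀ x0 x1 x2 x3 : Int, PySem.List.pyGetD [x0, x1, x2, x3] 3 0 = x3 from
        fun _ _ _ _ => rfl] <;>
    rw [k1, k2, k3, idx_max3] <;>
    norm_num

-- A's port evaluates to the normal form on Pre_
lemma A_canon (e : List (List Int)) (hpre : Pre_exhaustive e) : exhaustive e = pvCanon e := by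
  unfold exhaustive
  have hget : ∀ (v : List Int) (i c : Int), PySem.List.pyGet? v i = some c →
      PySem.List.pyGetD v i 0 = c := by
    intro v i c h; simp [PySem.List.pyGetD, h]
  have hhead := head_of_pre e hpre
  have h1 := fold_tally (fun v => PySem.List.pyGetD v 0 0) e 0 0 0 hhead
  simp only [show PySem.Dict.ofList ([(1, 0), (2, 0), (3, 0)] : List (Int × Int)) =
      PySem.Dict.mk [(1, 0), (2, 0), (3, 0)] from rfl, h1]
  have hfst : ∀ (P Q : Prop) [Decidable P] [Decidable Q] (x y z : Int),
      (if P then ((1 : Int), x) else if Q then (2, y) else (3, z)).1 =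
        if P then (1 : Int) else if Q then 2 else 3 := by
    intro P Q _ _ x y z; split_ifs <;> rfl
  simp only [min3_items, Option.getD_some, zero_add, hfst]
  have hL : (if ((e.countP (fun v => PySem.List.pyGetD v 0 0 == 1) : Int) ≤
        (e.countP (fun v => PySem.List.pyGetD v 0 0 == 2) : Int) ∧
        (e.countP (fun v => PySem.List.pyGetD v 0 0 == 1) : Int) ≤
        (e.countP (fun v => PySem.List.pyGetD v 0 0 == 3) : Int)) then (1 : Int)
      else if (e.countP (fun v => PySem.List.pyGetD v 0 0 == 2) : Int) ≤
        (e.countP (fun v => PySem.List.pyGetD v 0 0 == 3) : Int) then 2 else 3) = pvLoser e := rfl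
  rw [hL]
  -- A's second pass: rewrite the branching body as a single tally with the combined key
  have hbody : e.foldl (fun d v =>
      if PySem.List.pyGetD v 0 0 == pvLoser e then
        d.insert (PySem.List.pyGetD v 1 0) (d.getD (PySem.List.pyGetD v 1 0) 0 + 1)
      else
        d.insert (PySem.List.pyGetD v 0 0) (d.getD (PySem.List.pyGetD v 0 0) 0 + 1))
      (PySem.Dict.mk ([(1, 0), (2, 0), (3, 0)] : List (Int × Int))) =
    e.foldl (fun d v =>
      d.insert ((fun v => if PySem.List.pyGetD v 0 0 == pvLoser e then PySem.List.pyGetD v 1 0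
        else PySem.List.pyGetD v 0 0) v)
        (d.getD ((fun v => if PySem.List.pyGetD v 0 0 == pvLoser e then PySem.List.pyGetD v 1 0
        else PySem.List.pyGetD v 0 0) v) 0 + 1))
      (PySem.Dict.mk ([(1, 0), (2, 0), (3, 0)] : List (Int × Int))) := by
    apply PySem.List.foldl_congr_mem
    intro d v _
    by_cases h : PySem.List.pyGetD v 0 0 == pvLoser e <;> simp [h]
  have hsome : ∀ v ∈ e, PySem.List.pyGetD v 0 0 = pvLoser e →
      PySem.List.pyGet? v 0 = some (pvLoser e) := by
    intro v hv h
    rcases (hpre v hv).1 with h0 | h0 | h0 <;> rw [h0] <;>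
      exact congrArg some (by rw [← hget v 0 _ h0, h])
  have hkey : ∀ v ∈ e,
      (if PySem.List.pyGetD v 0 0 == pvLoser e then PySem.List.pyGetD v 1 0
        else PySem.List.pyGetD v 0 0) = 1 ∨
      (if PySem.List.pyGetD v 0 0 == pvLoser e then PySem.List.pyGetD v 1 0
        else PySem.List.pyGetD v 0 0) = 2 ∨
      (if PySem.List.pyGetD v 0 0 == pvLoser e then PySem.List.pyGetD v 1 0
        else PySem.List.pyGetD v 0 0) = 3 := by
    intro v hv
    by_cases h : PySem.List.pyGetD v 0 0 = pvLoser e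
    · rcases (hpre v hv).2 (hsome v hv h) with h1 | h1 | h1
      · simp [h, hget v 1 1 h1]
      · simp [h, hget v 1 2 h1]
      · simp [h, hget v 1 3 h1]
    · have hne : (PySem.List.pyGetD v 0 0 == pvLoser e) = false := by simp [h]
      rw [hne]; simpa using hhead v hv
  have h2 := fold_tally (fun v => if PySem.List.pyGetD v 0 0 == pvLoser e then
      PySem.List.pyGetD v 1 0 else PySem.List.pyGetD v 0 0) e 0 0 0 hkey
  rw [hbody, h2]
  simp only [max3_items, Option.getD_some, zero_add, hfst]
  rw [countP_combined, countP_combined, countP_combined]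
  rfl

-- ===== VERDICT =====
theorem exhaustive_spec : Claim_equal_exhaustive := by
  intro e _hdom hpre
  unfold Spec_exhaustive
  rw [A_canon e hpre, B_canon e (head_of_pre e hpre)]
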